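-- pv_equiv track=rewrite | github.com/chrisflath/chess960-nhb-replication | scripts/fig1_hero_chesscom.py | fen_to_td
-- ===== SOURCE A (Python) =====
-- from itertools import permutations
--
-- def fen_to_td(fen):
--     if fen is None: return None
--     r8 = fen.split('/')[0].upper()
--     exp = ''
--     for c in r8: exp += '.'*int(c) if c.isdigit() else c
--     if len(exp) != 8: return None
--     std = 'RNBQKBNR'; d = 0
--     for p in set(std):
--         sp = [i for i,c in enumerate(std) if c==p]
--         fp = [i for i,c in enumerate(exp) if c==p]
--         if len(sp)!=len(fp): return None
--         if len(sp)<=2: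
--             d += min(sum(abs(s-f) for s,f in zip(sp,pm)) for pm in permutations(fp))
--         else:
--             d += sum(abs(s-f) for s,f in zip(sorted(sp),sorted(fp)))
--     return d
-- ===== SOURCE B (Python) =====
-- def fen_to_td(fen):
--     if fen is None:
--         return None
--     r8 = fen.split('/')[0].upper()
--     exp = []
--     for c in r8:
--         exp.extend('.' * int(c) if c.isdigit() else c)
--     if len(exp) != 8:
--         return None
--     # one pass: group board indices by piece letter
--     pos = {}
--     for i, c in enumerate(exp):
--         pos.setdefault(c, []).append(i)
--     total = 0
--     for p, sp in (('R', [0, 7]), ('N', [1, 6]), ('B', [2, 5]), ('Q', [3]), ('K', [4])):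
--         fp = pos.get(p, [])
--         if len(fp) != len(sp):
--             return None
--         total += sum(abs(s - f) for s, f in zip(sp, fp))
--     return total
-- ===== Notes on version B (the rewrite author's own statement) =====
-- stated objective: simpler
-- what changed: B drops the per-piece enumerate scans and the min-over-permutations matching: one grouping pass collects board indices per piece into a dict, which is zipped in order against a constant table of standard slots (sorted-order L1 matching on a line equals the permutation minimum).
import Mathlib
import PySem

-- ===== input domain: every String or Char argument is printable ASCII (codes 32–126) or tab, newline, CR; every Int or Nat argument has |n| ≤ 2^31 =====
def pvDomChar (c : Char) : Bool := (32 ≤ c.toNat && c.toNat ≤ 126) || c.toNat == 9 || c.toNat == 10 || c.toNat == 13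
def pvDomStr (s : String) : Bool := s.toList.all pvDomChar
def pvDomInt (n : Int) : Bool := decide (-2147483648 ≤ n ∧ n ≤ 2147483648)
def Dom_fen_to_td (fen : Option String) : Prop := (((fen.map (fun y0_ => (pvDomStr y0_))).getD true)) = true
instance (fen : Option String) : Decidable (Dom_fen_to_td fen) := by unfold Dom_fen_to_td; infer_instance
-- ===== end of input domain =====

-- B replaces A's per-piece index scans and min-over-permutations matching by one grouping
-- pass over the board and a direct in-order zip against a constant table (objective: simpler).

-- ===== PORT A =====
-- [i for i,c in enumerate(l) if c == p]
def idxsA (l : List Char) (p : Char) : List Int :=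
  ((PySem.List.enumerate l).filter (fun ic => ic.2 == p)).map (fun ic => ic.1)

-- sum(abs(s-f) for s,f in zip(sp, fp))  (shared text in both Pythons)
def zipAbsSum (sp fp : List Int) : Int :=
  (sp.zip fp).foldl (fun a sf => a + ((sf.1 - sf.2).natAbs : Int)) 0

-- itertools.permutations(fp): hand port (PySem has no permutations); produces all
-- permutations, possibly in a different order — exact here because only the MINIMUM
-- over the list is used below.
def insertsA (x : Int) : List Int → List (List Int)
  | [] => [[x]]
  | y :: ys => (x :: y :: ys) :: (insertsA x ys).map (fun l => y :: l)

def permsA : List Int → List (List Int)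
  | [] => [[]]
  | x :: xs => (permsA xs).flatMap (insertsA x)

-- min(sum(...) for pm in permutations(fp)); the permutation list is never empty,
-- so Python's min never raises — the none branch is unreachable.
def minPermA (sp fp : List Int) : Int :=
  match PySem.List.min? ((permsA fp).map (fun pm => zipAbsSum sp pm)) (fun x => x) with
  | some v => v
  | none => 0

def stdListA : List Char := "RNBQKBNR".toList

-- the 'for p in set(std)' loop with early return
def loopA (exp : List Char) : List Char → Int → Option Int
  | [], d => some d
  | p :: ps, d =>
    let sp := idxsA stdListA p
    let fp := idxsA exp p
    if sp.length ≠ fp.length then none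
    else
      loopA exp ps (d + (if sp.length ≤ 2 then minPermA sp fp
        else zipAbsSum (PySem.List.sorted sp (fun x => x) false)
                       (PySem.List.sorted fp (fun x => x) false)))

-- exp += '.'*int(c) if c.isdigit() else c   (int(c) guarded by isdigit, so getD 0 is never used)
def expandA (r8 : List Char) : List Char :=
  r8.foldl (fun acc c =>
    acc ++ (if PySem.Chars.isdigit c then
              List.replicate ((PySem.Int.ofChars? [c]).getD 0).toNat '.'
            else [c])) []

def fen_to_td (fen : Option String) : Option Int :=
  match fen with
  | none => none
  | some s =>
    -- fen.split('/')[0].upper(); split with a nonempty separator is never empty, so [0] is headD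
    let r8 := PySem.Chars.upper ((PySem.Chars.splitOn s.toList ['/']).headD [])
    let exp := expandA r8
    if exp.length ≠ 8 then none
    else loopA exp (PySem.Set.ofList stdListA) 0

-- ===== PORT B =====
def expandB (r8 : List Char) : List Char :=
  r8.foldl (fun acc c =>
    acc ++ (if PySem.Chars.isdigit c then
              List.replicate ((PySem.Int.ofChars? [c]).getD 0).toNat '.'
            else [c])) []

-- pos.setdefault(c, []).append(i) over enumerate(exp)
def buildPosB (exp : List Char) : PySem.Dict Char (List Int) :=
  (PySem.List.enumerate exp).foldl
    (fun d ic => d.modify ic.2 [] (fun l => l ++ [ic.1])) PySem.Dict.empty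

def tblB : List (Char × List Int) :=
  [('R', [0, 7]), ('N', [1, 6]), ('B', [2, 5]), ('Q', [3]), ('K', [4])]

def loopB (pos : PySem.Dict Char (List Int)) : List (Char × List Int) → Int → Option Int
  | [], t => some t
  | psp :: rest, t =>
    let fp := pos.getD psp.1 []
    if fp.length ≠ psp.2.length then none
    else loopB pos rest (t + zipAbsSum psp.2 fp)

def fen_to_td_alt (fen : Option String) : Option Int :=
  match fen with
  | none => none
  | some s =>
    let r8 := PySem.Chars.upper ((PySem.Chars.splitOn s.toList ['/']).headD [])
    let exp := expandB r8
    if exp.length ≠ 8 then none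
    else loopB (buildPosB exp) tblB 0

-- ===== PRECONDITION & SPEC =====
def Spec_fen_to_td (fen : Option String) (out : Option Int) : Prop := out = fen_to_td_alt fen
instance (fen : Option String) (out : Option Int) : Decidable (Spec_fen_to_td fen out) := by unfold Spec_fen_to_td; infer_instance

-- ===== CLAIM (what is proved, stated in full; the proofs are below) =====
def Claim_equal_fen_to_td : Prop := ∀ (fen : Option String), Dom_fen_to_td fen → Spec_fen_to_td fen (fen_to_td fen)

-- ===== LEMMAS AND PROOFS =====

-- the grouping fold keeps, at key p, exactly the first components filtered by second = p
theorem getD_groupFold (l : List (Int × Char)) (d : PySem.Dict Char (List Int)) (p : Char) :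
    (l.foldl (fun d ic => d.modify ic.2 [] (fun l => l ++ [ic.1])) d).getD p []
      = d.getD p [] ++ (l.filter (fun ic => ic.2 == p)).map (fun ic => ic.1) := by
  induction l generalizing d with
  | nil => simp
  | cons ic t ih =>
    simp only [List.foldl_cons, List.filter_cons]
    rw [ih, PySem.Dict.getD_modify]
    by_cases h : p = ic.2
    · subst h
      simp
    · rw [if_neg h]
      have hb : (ic.2 == p) = false := by simpa using fun hh => h hh.symm
      simp [hb]

theorem posB_eq_idxsA (exp : List Char) (p : Char) :
    (buildPosB exp).getD p [] = idxsA exp p := by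
  unfold buildPosB idxsA
  rw [getD_groupFold]
  simp

theorem idxsA_pairwise (exp : List Char) (p : Char) :
    (idxsA exp p).Pairwise (· < ·) := by
  unfold idxsA
  refine List.Pairwise.map _ (fun a b h => h) ?_
  exact (PySem.List.pairwise_lt_enumerate exp 0).filter _

theorem contrib1 (a : Int) (fp : List Int) (hl : fp.length = 1) :
    minPermA [a] fp = zipAbsSum [a] fp := by
  match fp, hl with
  | [f], _ =>
    simp [minPermA, permsA, insertsA, zipAbsSum, PySem.List.min?_id_cons]

theorem contrib2 (a b : Int) (hab : a < b) (fp : List Int)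
    (hs : fp.Pairwise (· < ·)) (hl : fp.length = 2) :
    minPermA [a, b] fp = zipAbsSum [a, b] fp := by
  match fp, hl with
  | [f0, f1], _ =>
    have hf : f0 < f1 := by
      have := List.pairwise_cons.mp hs
      exact this.1 f1 (by simp)
    have hperm : permsA [f0, f1] = [[f0, f1], [f1, f0]] := rfl
    simp only [minPermA, hperm, List.map, zipAbsSum, List.zip, List.zipWith,
      List.foldl, PySem.List.min?_id_cons]
    omega

-- one piece step of the two loops agrees, for a 2-element standard slot
theorem step2 (exp : List Char) (a b : Int) (hab : a < b) (p : Char)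
    (hsp : idxsA stdListA p = [a, b]) (ps : List Char) (rest : List (Char × List Int)) (d : Int)
    (hrec : ∀ d' : Int, loopA exp ps d' = loopB (buildPosB exp) rest d') :
    loopA exp (p :: ps) d = loopB (buildPosB exp) ((p, [a, b]) :: rest) d := by
  simp only [loopA, loopB, hsp, posB_eq_idxsA, List.length_cons, List.length_nil]
  by_cases h : (idxsA exp p).length = 2
  · rw [if_neg (by omega), if_pos (by omega), if_neg (by omega),
        contrib2 a b hab _ (idxsA_pairwise exp p) h]
    exact hrec _
  · rw [if_pos (by omega), if_pos (by omega)]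

theorem step1 (exp : List Char) (a : Int) (p : Char)
    (hsp : idxsA stdListA p = [a]) (ps : List Char) (rest : List (Char × List Int)) (d : Int)
    (hrec : ∀ d' : Int, loopA exp ps d' = loopB (buildPosB exp) rest d') :
    loopA exp (p :: ps) d = loopB (buildPosB exp) ((p, [a]) :: rest) d := by
  simp only [loopA, loopB, hsp, posB_eq_idxsA, List.length_cons, List.length_nil]
  by_cases h : (idxsA exp p).length = 1
  · rw [if_neg (by omega), if_pos (by omega), if_neg (by omega),
        contrib1 a _ h]
    exact hrec _
  · rw [if_pos (by omega), if_pos (by omega)]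

theorem loops_eq (exp : List Char) (d : Int) :
    loopA exp (PySem.Set.ofList stdListA) d = loopB (buildPosB exp) tblB d := by
  have hset : PySem.Set.ofList stdListA = ['R', 'N', 'B', 'Q', 'K'] := by decide
  rw [hset]
  show loopA exp ('R' :: ['N', 'B', 'Q', 'K']) d
      = loopB (buildPosB exp) (('R', [0,7]) :: [('N',[1,6]),('B',[2,5]),('Q',[3]),('K',[4])]) d
  refine step2 exp 0 7 (by norm_num) 'R' (by decide) _ _ d (fun d1 => ?_)
  refine step2 exp 1 6 (by norm_num) 'N' (by decide) _ _ d1 (fun d2 => ?_)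
  refine step2 exp 2 5 (by norm_num) 'B' (by decide) _ _ d2 (fun d3 => ?_)
  refine step1 exp 3 'Q' (by decide) _ _ d3 (fun d4 => ?_)
  refine step1 exp 4 'K' (by decide) _ _ d4 (fun d5 => ?_)
  rfl

-- ===== VERDICT (by name: the statement is the Claim_ definition above) =====
theorem fen_to_td_spec : Claim_equal_fen_to_td := by
  intro fen _
  unfold Spec_fen_to_td fen_to_td fen_to_td_alt
  cases fen with
  | none => rfl
  | some s =>
    simp only []
    have hex : expandA = expandB := rfl
    rw [hex]
    by_cases h : (expandB (PySem.Chars.upper ((PySem.Chars.splitOn s.toList ['/']).headD []))).length = 8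
    · rw [if_neg (by omega), if_neg (by omega), loops_eq]
    · rw [if_pos h, if_pos h]
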